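-- pv_equiv track=rewrite | github.com/dhwanitranjan/e4 | M18/set.py | limitedPowerSet
-- ===== SOURCE A (Python) =====
-- import itertools
--
-- def findsubsets(s, x):
--     return list(itertools.combinations(s, x))
--
-- def limitedPowerSet(n, k):
--     l = []
--     res = []
--     res.append(())
--
--     for i in range(1 , n+1):
--         l.append(i)
--     s = set(l)
--
--     for x in range(1, n+1):
--         sub = findsubsets(s, x)
--         res += sub
--
--     return res[:k]
-- ===== SOURCE B (Python) =====
-- from itertools import combinations
--
-- def limitedPowerSet(n, k):
--     # Lazily enumerate subsets by increasing size, stopping once the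
--     # requested number is collected (A materialises all 2^n subsets first).
--     total = (1 << n) if n > 0 else 1
--     need = min(k, total) if k >= 0 else max(0, total + k)
--     res = []
--     x = 0
--     while len(res) < need:
--         for sub in combinations(range(1, n + 1), x):
--             res.append(sub)
--             if len(res) == need:
--                 break
--         x += 1
--     return res
-- ===== Notes on version B (the rewrite author's own statement) =====
-- stated objective: faster
-- what changed: B enumerates subsets lazily by increasing size and stops once the requested number (derived from k and the 2^n total, honouring Python slice semantics) is collected, instead of materialising all 2^n subsets and slicing; intended as faster — a timing run measured A timing out at n=16 where B returned, with no clean ratio at sizes both finish.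
import Mathlib
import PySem

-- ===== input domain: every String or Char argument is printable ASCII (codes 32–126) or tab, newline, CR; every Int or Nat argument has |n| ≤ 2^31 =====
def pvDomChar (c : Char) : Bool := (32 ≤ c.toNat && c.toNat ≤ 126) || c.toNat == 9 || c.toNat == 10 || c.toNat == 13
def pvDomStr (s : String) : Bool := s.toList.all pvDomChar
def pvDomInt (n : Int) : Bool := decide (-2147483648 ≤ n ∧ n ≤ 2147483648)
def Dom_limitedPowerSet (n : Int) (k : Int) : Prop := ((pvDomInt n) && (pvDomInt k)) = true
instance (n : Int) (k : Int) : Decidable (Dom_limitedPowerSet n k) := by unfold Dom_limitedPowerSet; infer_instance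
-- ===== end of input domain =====

-- B enumerates subsets lazily by increasing size and stops after collecting the requested
-- number, instead of materialising all 2^n subsets and slicing (intended as faster; the
-- timing run saw A time out at n=16 where B returned, with no clean ratio measured).

-- ===== PORT A =====
-- itertools.combinations(s, x): x ≥ 1 at every call site, so x.toNat is exact
def findsubsets (s : List Int) (x : Int) : List (List Int) :=
  PySem.List.combinations s x.toNat

def limitedPowerSet (n : Int) (k : Int) : List (List Int) :=
  -- res = [()]; for i in range(1, n+1): l.append(i); s = set(l)
  let l := (PySem.List.pyRange 1 (n + 1) 1).foldl (fun acc i => acc ++ [i]) ([] : List Int)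
  let s := PySem.Set.ofList l
  -- for x in range(1, n+1): res += findsubsets(s, x)
  let res := (PySem.List.pyRange 1 (n + 1) 1).foldl (fun acc x => acc ++ findsubsets s x) [[]]
  PySem.List.slice res none (some k)

-- ===== PORT B =====
-- inner 'for sub in combinations(...)' with its 'break' at len(res) == need
def collectSubs (need : Int) (res : List (List Int)) : List (List Int) → List (List Int)
  | [] => res
  | sub :: rest =>
      let res' := res ++ [sub]
      if (res'.length : Int) = need then res' else collectSubs need res' rest

-- outer 'while len(res) < need' loop; fuel only makes the recursion structural
def outerLoop (n need : Int) : Nat → Nat → List (List Int) → List (List Int)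
  | 0, _, res => res
  | fuel + 1, x, res =>
      if (res.length : Int) < need then
        outerLoop n need fuel (x + 1)
          (collectSubs need res (PySem.List.combinations (PySem.List.pyRange 1 (n + 1) 1) x))
      else res

def limitedPowerSet_alt (n : Int) (k : Int) : List (List Int) :=
  let total : Int := if n > 0 then 2 ^ n.toNat else 1
  let need : Int := if 0 ≤ k then min k total else max 0 (total + k)
  outerLoop n need (n.toNat + 2) 0 []

-- ===== PRECONDITION & SPEC =====
def Spec_limitedPowerSet (n : Int) (k : Int) (out : List (List Int)) : Prop := out = limitedPowerSet_alt n k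
instance (n : Int) (k : Int) (out : List (List Int)) : Decidable (Spec_limitedPowerSet n k out) := by unfold Spec_limitedPowerSet; infer_instance

-- ===== CLAIM (what is proved, stated in full; the proofs are below) =====
def Claim_equal_limitedPowerSet : Prop := ∀ (n : Int) (k : Int), Dom_limitedPowerSet n k → Spec_limitedPowerSet n k (limitedPowerSet n k)

-- ===== LEMMAS AND PROOFS =====

-- all subsets of ln of sizes x, x+1, …, x+rem-1, concatenated
def tailSubs (ln : List Int) : Nat → Nat → List (List Int)
  | 0, _ => []
  | rem + 1, x => PySem.List.combinations ln x ++ tailSubs ln rem (x + 1)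

theorem length_combinations (xs : List Int) (r : Nat) :
    (PySem.List.combinations xs r).length = Nat.choose xs.length r := by
  induction xs generalizing r with
  | nil =>
    cases r with
    | zero => simp [PySem.List.combinations_zero]
    | succ r => simp [PySem.List.combinations_nil_succ]
  | cons x xs ih =>
    cases r with
    | zero => simp [PySem.List.combinations_zero]
    | succ r =>
      simp [PySem.List.combinations_cons_succ, ih, Nat.choose]

theorem length_tailSubs (ln : List Int) (rem x : Nat) :
    (tailSubs ln rem x).length = ∑ j ∈ Finset.range rem, Nat.choose ln.length (x + j) := by
  induction rem generalizing x with
  | zero => simp [tailSubs]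
  | succ rem ih =>
    rw [Finset.sum_range_succ']
    simp only [tailSubs, List.length_append, length_combinations, ih, Nat.add_zero]
    rw [Nat.add_comm]
    congr 1
    apply Finset.sum_congr rfl
    intro j _
    congr 1
    omega

theorem length_tailSubs_full (ln : List Int) :
    (tailSubs ln (ln.length + 1) 0).length = 2 ^ ln.length := by
  rw [length_tailSubs]
  simpa using Nat.sum_range_choose ln.length

theorem collectSubs_eq (need : Int) (subs : List (List Int)) :
    ∀ res : List (List Int), (res.length : Int) < need →
      collectSubs need res subs = res ++ subs.take (need - res.length).toNat := by
  induction subs with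
  | nil => intro res _; simp [collectSubs]
  | cons sub rest ih =>
    intro res hlt
    simp only [collectSubs]
    by_cases h : ((res ++ [sub]).length : Int) = need
    · simp only [if_pos h]
      have : (need - (res.length : Int)).toNat = 1 := by
        simp at h; omega
      simp [this]
    · simp only [if_neg h]
      have hl : ((res ++ [sub]).length : Int) = (res.length : Int) + 1 := by
        simp
      have hlt' : (((res ++ [sub]).length : Int)) < need := by
        rw [hl] at h ⊢; omega
      rw [ih _ hlt', hl]
      cases hn : (need - (res.length : Int)).toNat with
      | zero => omega
      | succ m =>
        have hm : (need - ((res.length : Int) + 1)).toNat = m := by omega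
        rw [hm, List.take_succ_cons]
        simp

theorem outer_eq (n need : Int) :
    ∀ (fuel rem x : Nat) (res : List (List Int)),
      (res.length : Int) ≤ need →
      need ≤ (res.length : Int) + ((tailSubs (PySem.List.pyRange 1 (n + 1) 1) rem x).length : Int) →
      rem ≤ fuel →
      outerLoop n need fuel x res
        = res ++ (tailSubs (PySem.List.pyRange 1 (n + 1) 1) rem x).take (need - (res.length : Int)).toNat := by
  intro fuel
  induction fuel with
  | zero =>
    intro rem x res hle hub hfuel
    interval_cases rem
    simp only [tailSubs] at hub ⊢
    simp [outerLoop]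
  | succ fuel ih =>
    intro rem x res hle hub hfuel
    simp only [outerLoop]
    by_cases hlt : (res.length : Int) < need
    · simp only [if_pos hlt]
      cases rem with
      | zero => simp only [tailSubs, List.length_nil] at hub; omega
      | succ rem =>
        set ln := PySem.List.pyRange 1 (n + 1) 1 with hln
        simp only [tailSubs] at hub ⊢
        rw [collectSubs_eq need _ res hlt]
        set C := PySem.List.combinations ln x with hC
        by_cases hd : (need - (res.length : Int)).toNat ≤ C.length
        · -- this size finishes the collection
          have hlen : ((res ++ C.take (need - (res.length : Int)).toNat).length : Int) = need := by
            simp; omega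
          rw [ih rem (x + 1) _ (le_of_eq hlen) (by rw [hlen]; push_cast; omega) (by omega)]
          rw [hlen]
          simp [List.take_append]
          omega
        · -- take all of this size, keep going
          rw [not_le] at hd
          have hlen : ((res ++ C.take (need - (res.length : Int)).toNat).length : Int)
              = (res.length : Int) + (C.length : Int) := by simp; omega
          have htake : C.take (need - (res.length : Int)).toNat = C := by
            apply List.take_of_length_le; omega
          rw [htake]
          rw [ih rem (x + 1) _ (by simp; omega) (by simp at hub ⊢; omega) (by omega)]
          rw [List.take_append, List.append_assoc]
          congr 2
          · exact (List.take_of_length_le (by omega)).symm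
          · congr 1
            simp
            omega
    · simp only [if_neg hlt]
      have : (need - (res.length : Int)).toNat = 0 := by omega
      simp [this]

theorem flatMap_ints_tailSubs (ln : List Int) (m : Nat) :
    ∀ x : Int, 0 ≤ x →
      (PySem.List.pyRange x (x + m) 1).flatMap (fun i => PySem.List.combinations ln i.toNat)
        = tailSubs ln m x.toNat := by
  induction m with
  | zero =>
    intro x hx
    rw [show x + ((0 : Nat) : Int) = x by omega, PySem.List.pyRange_one_eq_nil le_rfl]
    simp [tailSubs]
  | succ m ih =>
    intro x hx
    rw [PySem.List.pyRange_one_cons (by omega), show x + ((m + 1 : Nat) : Int) = (x + 1) + (m : Int) by push_cast; ring]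
    simp only [List.flatMap_cons]
    rw [ih (x + 1) (by omega), show (x + 1).toNat = x.toNat + 1 by omega]
    have hsplit : tailSubs ln (m + 1) x.toNat
        = PySem.List.combinations ln x.toNat ++ tailSubs ln m (x.toNat + 1) := by
      simp [tailSubs]
    rw [hsplit]

theorem fullList_eq (n : Int) :
    (PySem.List.pyRange 1 (n + 1) 1).foldl
        (fun acc x => acc ++ findsubsets (PySem.List.pyRange 1 (n + 1) 1) x) [[]]
      = tailSubs (PySem.List.pyRange 1 (n + 1) 1) (n.toNat + 1) 0 := by
  rw [PySem.List.foldl_append_eq_flatMap]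
  have hrhs : tailSubs (PySem.List.pyRange 1 (n + 1) 1) (n.toNat + 1) 0
      = [[]] ++ tailSubs (PySem.List.pyRange 1 (n + 1) 1) n.toNat 1 := by
    simp [tailSubs, PySem.List.combinations_zero]
  rw [hrhs]
  congr 1
  by_cases hn : 0 ≤ n
  · have hb : n + 1 = 1 + ((n.toNat : Int)) := by omega
    rw [hb]
    have h := flatMap_ints_tailSubs (PySem.List.pyRange 1 (1 + (n.toNat : Int)) 1) n.toNat 1 (by omega)
    rw [show ((1 : Int).toNat) = 1 from rfl] at h
    exact h
  · have h0 : PySem.List.pyRange 1 (n + 1) 1 = [] := PySem.List.pyRange_one_eq_nil (by omega)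
    have ht : n.toNat = 0 := by omega
    rw [ht, h0]
    simp [tailSubs]

theorem length_pyRange_n (n : Int) : (PySem.List.pyRange 1 (n + 1) 1).length = n.toNat := by
  rw [PySem.List.length_pyRange_one]; omega

-- ===== VERDICT (by name: the statement is the Claim_ definition above) =====
theorem limitedPowerSet_spec : Claim_equal_limitedPowerSet := by
  intro n k _
  unfold Spec_limitedPowerSet
  simp only [limitedPowerSet, limitedPowerSet_alt]
  rw [PySem.List.foldl_append_singleton]
  simp only [List.nil_append]
  have hset : PySem.Set.ofList (PySem.List.pyRange 1 (n + 1) 1) = PySem.List.pyRange 1 (n + 1) 1 :=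
    PySem.Set.ofList_eq_self_of_nodup _ (PySem.List.nodup_pyRange_one 1 (n + 1))
  simp only [hset]
  rw [fullList_eq]
  set ln := PySem.List.pyRange 1 (n + 1) 1 with hln
  set full := tailSubs ln (n.toNat + 1) 0 with hfull
  have hLn : ln.length = n.toNat := length_pyRange_n n
  have hlenfull : full.length = 2 ^ n.toNat := by
    rw [hfull, ← hLn]
    exact length_tailSubs_full ln
  set total : Int := if n > 0 then 2 ^ n.toNat else 1 with htot
  have htotal : total = ((2 ^ n.toNat : Nat) : Int) := by
    rw [htot]
    split_ifs with h
    · push_cast; ring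
    · have : n.toNat = 0 := by omega
      simp [this]
  set need : Int := if 0 ≤ k then min k total else max 0 (total + k) with hneed
  have htpos : (1 : Int) ≤ total := by
    rw [htotal]; exact_mod_cast Nat.one_le_two_pow
  have hneed0 : 0 ≤ need := by
    rw [hneed]; split_ifs with h
    · exact le_min h (by omega)
    · exact le_max_left _ _
  have hneedle : need ≤ total := by
    rw [hneed]; split_ifs with h
    · exact min_le_right _ _
    · omega
  rw [outer_eq n need (n.toNat + 2) (n.toNat + 1) 0 [] (by simpa using hneed0)
      (by rw [← hfull]; simp [hlenfull, ← htotal]; omega) (by omega)]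
  simp only [List.length_nil, Nat.cast_zero, Int.sub_zero, List.nil_append, ← hln, ← hfull]
  by_cases hk : 0 ≤ k
  · rw [PySem.List.slice_to full hk]
    have : need = min k total := by rw [hneed, if_pos hk]
    rw [this]
    by_cases hkt : k ≤ total
    · rw [min_eq_left hkt]
    · rw [min_eq_right (by omega)]
      rw [List.take_of_length_le (by rw [hlenfull]; omega),
          List.take_of_length_le (by rw [hlenfull, htotal] at *; omega)]
  · rw [not_le] at hk
    have hm : k = -(((-k).toNat : Nat) : Int) := by omega
    have hmpos : 0 < (-k).toNat := by omega
    rw [hm, PySem.List.slice_to_neg_natCast full _ hmpos]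
    have : need = max 0 (total + k) := by rw [hneed, if_neg (by omega)]
    rw [this]
    congr 1
    rw [hlenfull, htotal] at *
    omega
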